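-- pv_equiv track=rewrite | github.com/eduabranco/LFA-Maquinas-de-Turing | q1.py | mt_q1
-- ===== SOURCE A (Python) =====
-- def mt_q1(x, estado_atual='q0', i=0):
--     if estado_atual == 'q0':
--         if len(x) == i:
--             x.append(1)
--             i += 1
--             novo_estado = 'q1'
--             return mt_q1(x, novo_estado, i)
--         if x[i] == 1:
--             x[i] = 0
--             i += 1
--             novo_estado = 'q0'
--             return mt_q1(x, novo_estado, i)
--         if x[i] == 0:
--             x[i] = 1
--             i += 1
--             novo_estado = 'q1'
--             return mt_q1(x, novo_estado, i)
--     return x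
-- ===== SOURCE B (Python) =====
-- # Same tape transformation as A, but as an explicit left-to-right while loop
-- # instead of tail recursion through a state parameter; mutates x in place like A.
-- def mt_q1(x, estado_atual='q0', i=0):
--     if estado_atual != 'q0':
--         return x
--     while i < len(x):
--         if x[i] == 1:
--             x[i] = 0
--             i += 1
--         elif x[i] == 0:
--             x[i] = 1
--             return x
--         else:
--             return x
--     x.append(1)
--     return x
-- ===== Notes on version B (the rewrite author's own statement) =====
-- stated objective: simpler
-- what changed: Replaces the tail recursion threading an explicit Turing-machine state parameter with a plain left-to-right while loop over the tape (flip 1s to 0 until a 0 is flipped to 1 or the tape ends, then append 1).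
import Mathlib
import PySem

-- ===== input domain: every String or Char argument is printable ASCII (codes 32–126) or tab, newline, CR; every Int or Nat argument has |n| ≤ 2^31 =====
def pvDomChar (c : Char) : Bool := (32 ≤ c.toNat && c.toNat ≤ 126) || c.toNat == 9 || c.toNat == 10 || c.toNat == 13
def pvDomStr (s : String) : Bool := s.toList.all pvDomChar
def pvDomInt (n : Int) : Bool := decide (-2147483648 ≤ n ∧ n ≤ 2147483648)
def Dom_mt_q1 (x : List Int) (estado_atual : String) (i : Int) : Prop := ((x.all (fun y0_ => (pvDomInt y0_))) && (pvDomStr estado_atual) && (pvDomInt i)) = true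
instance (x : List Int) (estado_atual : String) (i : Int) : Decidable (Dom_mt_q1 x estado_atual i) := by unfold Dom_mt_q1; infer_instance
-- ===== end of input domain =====

-- B replaces A's state-threading tail recursion with a plain left-to-right loop over the tape;
-- both Pythons mutate x in place identically on Pre_, the theorem is about the return value.


-- ===== PORT A =====
-- x[i] reads/writes use PySem.List.pyGet?/pySetD (Python negative-index rule); the 'none'
-- case (Python IndexError) is excluded by Pre_ and the port returns x there.
def mt_q1 (x : List Int) (estado_atual : String) (i : Int) : List Int :=
  if estado_atual = "q0" then
    if (x.length : Int) = i then
      mt_q1 (x ++ [1]) "q1" (i + 1)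
    else if hv : PySem.List.pyGet? x i = some 1 then
      mt_q1 (PySem.List.pySetD x i 0) "q0" (i + 1)
    else if PySem.List.pyGet? x i = some 0 then
      PySem.List.pySetD x i 1
    else x
  else x
termination_by ((if estado_atual = "q0" then 1 else 0 : Nat), ((x.length : Int) + 1 - i).toNat)
decreasing_by
  · simp_all
    exact Prod.Lex.left _ _ (by omega)
  · simp_all
    apply Prod.Lex.right
    have h : PySem.Raise.InRange x.length i := by
      by_contra hc
      rw [← PySem.List.pyGet?_eq_none_iff] at hc
      simp_all
    unfold PySem.Raise.InRange at h
    simp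
    omega

-- ===== PORT B =====
-- the 'while i < len(x):' loop of Source B
def mtq1Loop (x : List Int) (i : Int) : List Int :=
  if h : i < (x.length : Int) then
    match PySem.List.pyGet? x i with
    | some 1 => mtq1Loop (PySem.List.pySetD x i 0) (i + 1)
    | some 0 => PySem.List.pySetD x i 1
    | _ => x
  else x ++ [1]
termination_by ((x.length : Int) - i).toNat
decreasing_by
  simp
  omega

def mt_q1_alt (x : List Int) (estado_atual : String) (i : Int) : List Int :=
  if estado_atual ≠ "q0" then x
  else mtq1Loop x i

-- ===== PRECONDITION & SPEC =====
-- Pre_ excludes exactly the inputs where A raises IndexError: estado 'q0' with i outside [-len(x), len(x)].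
def Pre_mt_q1 (x : List Int) (estado_atual : String) (i : Int) : Prop :=
  estado_atual = "q0" → (-(x.length : Int) ≤ i ∧ i ≤ (x.length : Int))
instance (x : List Int) (estado_atual : String) (i : Int) : Decidable (Pre_mt_q1 x estado_atual i) := by unfold Pre_mt_q1; infer_instance

def pvWitness_mt_q1 : List Int × String × Int := ([1, 1, 0, 1], "q0", 0)

def Spec_mt_q1 (x : List Int) (estado_atual : String) (i : Int) (out : List Int) : Prop := out = mt_q1_alt x estado_atual i
instance (x : List Int) (estado_atual : String) (i : Int) (out : List Int) : Decidable (Spec_mt_q1 x estado_atual i out) := by unfold Spec_mt_q1; infer_instance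

-- ===== CLAIM (what is proved, stated in full; the proofs are below) =====
def Claim_equal_mt_q1 : Prop := ∀ (x : List Int) (estado_atual : String) (i : Int), Dom_mt_q1 x estado_atual i → Pre_mt_q1 x estado_atual i → Spec_mt_q1 x estado_atual i (mt_q1 x estado_atual i)

-- ===== LEMMAS AND PROOFS =====

lemma mt_q1_notq0 (x : List Int) (e : String) (i : Int) (h : e ≠ "q0") : mt_q1 x e i = x := by
  rw [mt_q1]; simp [h]

lemma mt_q1_eq_loop : ∀ (n : Nat) (x : List Int) (i : Int),
    (x.length : Int) - i ≤ n → -(x.length : Int) ≤ i → i ≤ (x.length : Int) →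
    mt_q1 x "q0" i = mtq1Loop x i := by
  intro n
  induction n with
  | zero =>
    intro x i h1 _ h3
    have hi : i = (x.length : Int) := by omega
    rw [mt_q1, mtq1Loop]
    simp [hi, mt_q1_notq0]
  | succ n ih =>
    intro x i h1 h2 h3
    by_cases hi : i = (x.length : Int)
    · rw [mt_q1, mtq1Loop]
      simp [hi, mt_q1_notq0]
    · have hlt : i < (x.length : Int) := lt_of_le_of_ne h3 hi
      have hin : PySem.Raise.InRange x.length i := by
        unfold PySem.Raise.InRange; omega
      obtain ⟨v, hv⟩ : ∃ v, PySem.List.pyGet? x i = some v := by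
        cases hq : PySem.List.pyGet? x i with
        | none => rw [PySem.List.pyGet?_eq_none_iff] at hq; exact absurd hin hq
        | some v => exact ⟨v, rfl⟩
      have hlen : (PySem.List.pySetD x i 0).length = x.length := by
        simp [PySem.List.length_pySetD]
      rw [mt_q1, mtq1Loop]
      simp only [if_neg (Ne.symm hi), dif_pos hlt, hv]
      by_cases h1v : v = 1
      · subst h1v
        exact ih (PySem.List.pySetD x i 0) (i + 1) (by rw [hlen]; omega)
          (by rw [hlen]; omega) (by rw [hlen]; omega)
      · by_cases h0v : v = 0
        · subst h0v
          simp
        · have hne1 : ¬ (some v = some (1 : Int)) := by simpa using h1v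
          have hne0 : ¬ (some v = some (0 : Int)) := by simpa using h0v
          rw [dif_neg hne1, if_neg hne0]
          match v, h1v, h0v with
          | Int.negSucc _, _, _ => rfl
          | (0:Nat), _, h => exact absurd rfl h
          | (1:Nat), h, _ => exact absurd rfl h
          | (Nat.succ (Nat.succ _) : Nat), _, _ => rfl

-- ===== VERDICT (by name: the statement is the Claim_ definition above) =====
theorem mt_q1_spec : Claim_equal_mt_q1 := by
  intro x e i _ hpre
  unfold Spec_mt_q1 mt_q1_alt
  by_cases he : e = "q0"
  · subst he
    obtain ⟨h2, h3⟩ := hpre rfl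
    simp only [ne_eq, not_true_eq_false, if_false]
    exact mt_q1_eq_loop ((x.length : Int) - i).toNat x i (by omega) h2 h3
  · simp [he, mt_q1_notq0 x e i he]
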